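-- pv_equiv track=rewrite | github.com/protocolstardust/rayforce | docs/tests/test_docs.py | count_parens
-- ===== SOURCE A (Python) =====
-- def count_parens(s: str) -> int:
--     """Count net parentheses (open - close), ignoring those in strings.
--
--     Note: In RayForce, ' is a quote operator for symbols, not a string delimiter.
--     Only " is a string delimiter.
--     """
--     in_string = False
--     count = 0
--     i = 0
--     while i < len(s):
--         c = s[i]
--         if not in_string:
--             if c == '"':
--                 in_string = True
--             elif c == '(':
--                 count += 1
--             elif c == ')':
--                 count -= 1
--         else:
--             if c == '"' and (i == 0 or s[i-1] != '\\'):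
--                 in_string = False
--         i += 1
--     return count
-- ===== SOURCE B (Python) =====
-- def count_parens(s: str) -> int:
--     """Count net parentheses (open - close), ignoring those in strings.
--
--     Segment-based rewrite: repeatedly split off the text before the next
--     quote with str.partition and tally its parens with str.count, then skip
--     the string literal by partitioning until a closing quote that is not
--     preceded by a backslash.
--     """
--     count = 0
--     rem = s
--     while True:
--         head, sep, rem = rem.partition('"')
--         count += head.count('(') - head.count(')')
--         if not sep:
--             return count
--         while True:
--             body, sep, rem = rem.partition('"')
--             if not sep:
--                 return count
--             if not body.endswith('\\'):
--                 break
-- ===== Notes on version B (the rewrite author's own statement) =====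
-- stated objective: faster
-- what changed: Replaced A's per-character index loop with an in_string flag and s[i-1] lookback by repeated str.partition splitting at the quote delimiter: paren-netting each segment outside strings with str.count and skipping string literals by partitioning until a closing quote whose body does not end in a backslash.
import Mathlib
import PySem

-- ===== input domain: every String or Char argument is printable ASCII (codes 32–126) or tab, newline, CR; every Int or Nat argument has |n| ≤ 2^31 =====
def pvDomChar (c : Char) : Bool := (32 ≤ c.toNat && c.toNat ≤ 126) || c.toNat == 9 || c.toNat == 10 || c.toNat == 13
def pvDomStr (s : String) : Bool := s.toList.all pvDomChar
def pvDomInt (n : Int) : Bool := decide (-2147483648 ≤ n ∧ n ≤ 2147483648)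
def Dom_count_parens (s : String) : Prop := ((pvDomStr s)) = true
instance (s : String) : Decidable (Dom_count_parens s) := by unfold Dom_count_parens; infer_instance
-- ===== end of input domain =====

-- B replaces A's per-character in_string state machine with partition-based segment
-- splitting at quotes (bulk str.partition/str.count work; measurably faster by a constant factor).

-- ===== PORT A =====
-- A's while loop over index i, carrying in_string/count, reading s[i] and s[i-1]:
-- transliterated as recursion over the character list carrying the previous char
-- (prev = none ⟺ i == 0, matching the 'i == 0 or s[i-1] != '\\'' test).
def loopA : List Char → Option Char → Bool → Int → Int
  | [], _, _, count => count
  | c :: rest, prev, inStr, count =>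
    if !inStr then
      if c = '"' then loopA rest (some c) true count
      else if c = '(' then loopA rest (some c) inStr (count + 1)
      else if c = ')' then loopA rest (some c) inStr (count - 1)
      else loopA rest (some c) inStr count
    else
      if c = '"' ∧ (prev = none ∨ prev ≠ some '\\') then loopA rest (some c) false count
      else loopA rest (some c) true count

def count_parens (s : String) : Int := loopA s.toList none false 0

-- ===== PORT B =====
-- hand port of str.partition('"') on the char list: (part before the first '"',
-- whether a '"' was found, part after it); exact for the one-char separator '"'.
def partQ : List Char → List Char × Bool × List Char
  | [] => ([], false, [])
  | c :: rest =>
    if c = '"' then ([], true, rest)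
    else
      let p := partQ rest
      (c :: p.1, p.2.1, p.2.2)

-- head.count '(' - head.count ')', via List.count (exact for a 1-char needle)
def netB (h : List Char) : Int := (h.count '(' : Int) - (h.count ')' : Int)

theorem partQ_found_length : ∀ cs : List Char, (partQ cs).2.1 = true →
    (partQ cs).2.2.length < cs.length := by
  intro cs
  induction cs with
  | nil => simp [partQ]
  | cons c rest ih =>
    by_cases h : c = '"'
    · simp [partQ, h]
    · intro hf
      simp only [partQ, if_neg h, List.length_cons] at hf ⊢
      exact Nat.lt_succ_of_lt (ih hf)

mutual
-- the outer while loop of Source B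
def goOut (count : Int) (cs : List Char) : Int :=
  let p := partQ cs
  let c2 := count + netB p.1
  if h : p.2.1 = true then goIn c2 p.2.2 else c2
termination_by (cs.length, 1)
decreasing_by exact Prod.Lex.left _ _ (partQ_found_length _ h)
-- the inner while loop of Source B (body.endswith('\\') ↦ getLast? = some '\\')
def goIn (count : Int) (cs : List Char) : Int :=
  let p := partQ cs
  if h : p.2.1 = true then
    if p.1.getLast? = some '\\' then goIn count p.2.2
    else goOut count p.2.2
  else count
termination_by (cs.length, 0)
decreasing_by
  · exact Prod.Lex.left _ _ (partQ_found_length _ h)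
  · exact Prod.Lex.left _ _ (partQ_found_length _ h)
end

def count_parens_alt (s : String) : Int := goOut 0 s.toList

-- ===== PRECONDITION & SPEC =====
def Spec_count_parens (s : String) (out : Int) : Prop := out = count_parens_alt s
instance (s : String) (out : Int) : Decidable (Spec_count_parens s out) := by unfold Spec_count_parens; infer_instance

-- ===== CLAIM (what is proved, stated in full; the proofs are below) =====
def Claim_equal_count_parens : Prop := ∀ (s : String), Dom_count_parens s → Spec_count_parens s (count_parens s)

-- ===== LEMMAS AND PROOFS =====

-- proof-only helpers: A's inside-string scan (prev-char tracked), and B's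
-- inner loop abstracted as a quote-skipping function
def scanIn : Char → List Char → Option (List Char)
  | _, [] => none
  | p, c :: rest => if c = '"' ∧ p ≠ '\\' then some rest else scanIn c rest

def skipB (cs : List Char) : Option (List Char) :=
  let p := partQ cs
  if h : p.2.1 = true then
    if p.1.getLast? = some '\\' then skipB p.2.2 else some p.2.2
  else none
termination_by cs.length
decreasing_by exact partQ_found_length _ h

theorem partQ_cons_ne (c : Char) (rest : List Char) (hc : ¬ c = '"') :
    partQ (c :: rest) = (c :: (partQ rest).1, (partQ rest).2.1, (partQ rest).2.2) := by
  simp [partQ, hc]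

theorem netB_nil : netB [] = 0 := by simp [netB]

theorem netB_cons (c : Char) (h : List Char) :
    netB (c :: h) = (if c = '(' then 1 else if c = ')' then -1 else 0) + netB h := by
  by_cases h1 : c = '('
  · simp [netB, h1, List.count_cons]; ring
  · by_cases h2 : c = ')'
    · simp [netB, h1, h2, List.count_cons]; ring
    · simp [netB, h1, h2, List.count_cons]

-- L1: A's loop in the outside state, expressed through partQ
theorem loopA_outside : ∀ (cs : List Char) (prev : Option Char) (count : Int),
    loopA cs prev false count =
      (if (partQ cs).2.1 = true then
        loopA (partQ cs).2.2 (some '"') true (count + netB (partQ cs).1)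
      else count + netB (partQ cs).1) := by
  intro cs
  induction cs with
  | nil => intro prev count; simp [loopA, partQ, netB_nil]
  | cons c rest ih =>
    intro prev count
    by_cases hc : c = '"'
    · simp [loopA, hc, partQ, netB_nil]
    · rw [partQ_cons_ne c rest hc, netB_cons]
      by_cases h1 : c = '('
      · simp only [loopA, Bool.not_false, if_pos rfl, if_neg hc, if_pos h1, ih]
        simp [h1]; ring_nf
      · by_cases h2 : c = ')'
        · simp only [loopA, Bool.not_false, if_pos rfl, if_neg hc, if_neg h1, if_pos h2, ih]
          simp [h1, h2]; ring_nf
        · simp only [loopA, Bool.not_false, if_pos rfl, if_neg hc, if_neg h1, if_neg h2, ih]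
          simp [h1, h2]

-- L2: A's loop in the inside state, expressed through scanIn
theorem loopA_inside : ∀ (cs : List Char) (p : Char) (count : Int),
    loopA cs (some p) true count =
      (match scanIn p cs with
       | none => count
       | some r => loopA r (some '"') false count) := by
  intro cs
  induction cs with
  | nil => intro p count; simp [loopA, scanIn]
  | cons c rest ih =>
    intro p count
    by_cases hg : c = '"' ∧ p ≠ '\\'
    · obtain ⟨hc, hp⟩ := hg
      subst hc
      simp [loopA, scanIn, hp]
    · simp only [scanIn, if_neg hg]
      have hng : ¬ (c = '"' ∧ (some p = none ∨ some p ≠ some '\\')) := by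
        rintro ⟨h1, h2 | h2⟩
        · exact absurd h2 (by simp)
        · exact hg ⟨h1, by simpa using h2⟩
      have hnt : ¬ ((!true) = true) := by simp
      simp only [loopA, if_neg hnt, if_neg hng]
      exact ih c count

theorem skipB_unfold (cs : List Char) : skipB cs =
    (if (partQ cs).2.1 = true then
      (if (partQ cs).1.getLast? = some '\\' then skipB (partQ cs).2.2 else some (partQ cs).2.2)
    else none) := by
  rw [skipB]
  simp only [dite_eq_ite]

theorem skipB_cons (c : Char) (rest : List Char) (hc : ¬ c = '"')
    (h : c ≠ '\\' ∨ (partQ rest).1 ≠ []) : skipB (c :: rest) = skipB rest := by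
  rw [skipB_unfold (c :: rest), skipB_unfold rest, partQ_cons_ne c rest hc]
  rcases hb : (partQ rest).1 with _ | ⟨x, xs⟩
  · rcases h with h | h
    · simp [hb, h]
    · exact absurd hb h
  · simp [hb]

theorem skipB_length : ∀ (n : ℕ) (cs : List Char), cs.length ≤ n →
    ∀ r, skipB cs = some r → r.length < cs.length := by
  intro n
  induction n with
  | zero =>
    intro cs hlen r hr
    have : cs = [] := by rwa [← List.length_eq_zero_iff, ← Nat.le_zero]
    subst this
    rw [skipB_unfold] at hr
    simp [partQ] at hr
  | succ n ih =>
    intro cs hlen r hr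
    rw [skipB_unfold] at hr
    by_cases hf : (partQ cs).2.1 = true
    · have hlt := partQ_found_length cs hf
      by_cases he : (partQ cs).1.getLast? = some '\\'
      · rw [if_pos hf, if_pos he] at hr
        have := ih (partQ cs).2.2 (by omega) r hr
        omega
      · rw [if_pos hf, if_neg he] at hr
        have : r = (partQ cs).2.2 := by simpa using hr.symm
        rw [this]
        exact hlt
    · simp [hf] at hr

-- S: with a non-backslash previous character, A's inside scan = B's quote skipping
theorem scanIn_eq_skipB : ∀ (n : ℕ) (cs : List Char), cs.length ≤ n → ∀ (p : Char),
    (p ≠ '\\' ∨ cs.head? ≠ some '"') → scanIn p cs = skipB cs := by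
  intro n
  induction n with
  | zero =>
    intro cs hlen p _
    have : cs = [] := by rwa [← List.length_eq_zero_iff, ← Nat.le_zero]
    subst this
    rw [skipB_unfold]
    simp [scanIn, partQ]
  | succ n ih =>
    intro cs hlen p hguard
    rcases cs with _ | ⟨c, rest⟩
    · rw [skipB_unfold]; simp [scanIn, partQ]
    · simp only [List.length_cons, Nat.succ_le_succ_iff] at hlen
      by_cases hc : c = '"'
      · have hp : p ≠ '\\' := by
          rcases hguard with h | h
          · exact h
          · exact absurd (by simp [hc]) h
        subst hc
        rw [skipB_unfold]
        simp [scanIn, hp, partQ]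
      · have hstep : scanIn p (c :: rest) = scanIn c rest := by
          simp [scanIn, hc]
        rw [hstep]
        by_cases hb : c = '\\'
        · rcases rest with _ | ⟨c', rest'⟩
          · rw [skipB_unfold]
            simp [scanIn, partQ, hc]
          · by_cases hq : c' = '"'
            · subst hq hb
              have h1 : scanIn '\\' ('"' :: rest') = scanIn '"' rest' := by
                simp [scanIn]
              rw [h1, ih rest' (by simp at hlen; omega) '"' (Or.inl (by decide))]
              rw [skipB_unfold ('\\' :: '"' :: rest')]
              rw [partQ_cons_ne '\\' ('"' :: rest') (by decide)]
              simp [partQ]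
            · rw [ih (c' :: rest') hlen c (by right; simp [hq])]
              exact (skipB_cons c (c' :: rest') hc
                (Or.inr (by rw [partQ_cons_ne c' rest' hq]; simp))).symm
        · rw [ih rest hlen c (Or.inl hb)]
          exact (skipB_cons c rest hc (Or.inl hb)).symm

theorem goOut_unfold (count : Int) (cs : List Char) : goOut count cs =
    (if (partQ cs).2.1 = true then goIn (count + netB (partQ cs).1) (partQ cs).2.2
     else count + netB (partQ cs).1) := by
  rw [goOut]
  split <;> rfl

theorem goIn_unfold (count : Int) (cs : List Char) : goIn count cs =
    (if (partQ cs).2.1 = true then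
      (if (partQ cs).1.getLast? = some '\\' then goIn count (partQ cs).2.2
       else goOut count (partQ cs).2.2)
     else count) := by
  rw [goIn]
  split <;> rfl

-- GI: B's inner loop computed through skipB
theorem goIn_eq_skipB : ∀ (n : ℕ) (cs : List Char), cs.length ≤ n → ∀ (count : Int),
    goIn count cs = (match skipB cs with
                     | none => count
                     | some r => goOut count r) := by
  intro n
  induction n with
  | zero =>
    intro cs hlen count
    have : cs = [] := by rwa [← List.length_eq_zero_iff, ← Nat.le_zero]
    subst this
    rw [goIn_unfold, skipB_unfold]
    simp [partQ]
  | succ n ih =>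
    intro cs hlen count
    rw [goIn_unfold, skipB_unfold]
    by_cases hf : (partQ cs).2.1 = true
    · have hlt := partQ_found_length cs hf
      by_cases he : (partQ cs).1.getLast? = some '\\'
      · rw [if_pos hf, if_pos he, if_pos hf, if_pos he]
        exact ih (partQ cs).2.2 (by omega) count
      · simp [hf, he]
    · simp [hf]

-- main induction: A's loop from the outside state = B's outer loop
theorem loopA_eq_goOut : ∀ (n : ℕ) (cs : List Char), cs.length ≤ n →
    ∀ (prev : Option Char) (count : Int), loopA cs prev false count = goOut count cs := by
  intro n
  induction n with
  | zero =>
    intro cs hlen prev count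
    have : cs = [] := by rwa [← List.length_eq_zero_iff, ← Nat.le_zero]
    subst this
    rw [goOut_unfold]
    simp [loopA, partQ, netB_nil]
  | succ n ih =>
    intro cs hlen prev count
    rw [loopA_outside, goOut_unfold]
    by_cases hf : (partQ cs).2.1 = true
    · rw [if_pos hf, if_pos hf]
      have hlt := partQ_found_length cs hf
      rw [loopA_inside, goIn_eq_skipB (n := n) (partQ cs).2.2 (by omega)]
      rw [scanIn_eq_skipB (n := n) (partQ cs).2.2 (by omega) '"' (Or.inl (by decide))]
      rcases hs : skipB (partQ cs).2.2 with _ | r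
      · rfl
      · have hr := skipB_length (n := n) (partQ cs).2.2 (by omega) r hs
        exact ih r (by omega) (some '"') (count + netB (partQ cs).1)
    · rw [if_neg hf, if_neg hf]

-- ===== VERDICT (by name: the statement is the Claim_ definition above) =====
theorem count_parens_spec : Claim_equal_count_parens := by
  intro s _
  unfold Spec_count_parens count_parens count_parens_alt
  exact loopA_eq_goOut s.toList.length s.toList le_rfl none 0
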